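-- pv_equiv track=rewrite | github.com/franciscomaestre/text_analisys | seo/audits/site/better_headlines.py | removeCommonsParts
-- ===== SOURCE A (Python) =====
-- def removeCommonsParts(sentences):
--     try:
--         import operator
--         commons = {}
--
--         for index, sentence in enumerate(sentences):
--             for sentence2compare in sentences[index+1:]:
--                 if sentence != sentence2compare:
--                     commonSubString = longestSubstringFinder(sentence, sentence2compare)
--                     if commonSubString and len(commonSubString) > 10:
--                         if commonSubString not in commons:
--                             commons[commonSubString] = 0
--                         commons[commonSubString] += 1
--
--         if commons:
--             commons = sorted(commons.items(), key=operator.itemgetter(1), reverse=True)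
--             commonString = commons[0][0]
--             return [sentence.replace(commonString, '') for sentence in sentences]
--
--         return sentences
--     except:
--         return sentences
--
-- def longestSubstringFinder(string1, string2):
--     candidates = []
--     parts1 = string1.split()
--     parts2 = string2.split()
--     for index1, part1 in enumerate(parts1):
--         for index2, part2 in enumerate(parts2):
--             if part1 == part2:
--                 candidates.append(substring(parts1[index1:], parts2[index2:]))
--
--     if candidates:
--         candidates.sort(key = lambda s: len(s), reverse=True)
--         return candidates[0]
--     else:
--         return None
--
-- def substring(parts1, parts2):
--     commonString = []
--     for index, part1 in enumerate(parts1):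
--             try:
--                 if parts1[index] == parts2[index]:
--                     commonString.append(part1)
--             except:
--                 break
--     return u' '.join(commonString)
-- ===== SOURCE B (Python) =====
-- def removeCommonsParts(sentences):
--     commons = {}
--     n = len(sentences)
--     for i in range(n):
--         for j in range(i + 1, n):
--             if sentences[i] != sentences[j]:
--                 common = longestCommon(sentences[i], sentences[j])
--                 if common is not None and len(common) > 10:
--                     commons[common] = commons.get(common, 0) + 1
--     if not commons:
--         return sentences
--     commonString = max(commons.items(), key=lambda kv: kv[1])[0]
--     return [s.replace(commonString, '') for s in sentences]
--
-- def longestCommon(s1, s2):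
--     # Diagonal sweep: for each alignment shift of the two word lists, only the
--     # FIRST word match on that diagonal can be a longest aligned-match join
--     # (later matches on the same diagonal give strict suffixes), so one candidate
--     # per diagonal is examined rather than one per matching word pair.
--     p1, p2 = s1.split(), s2.split()
--     best = None  # (key, candidate); key = (-len, i1, i2) picks A's first maximum
--     for shift in range(-len(p2) + 1, len(p1)):
--         i1, i2 = max(shift, 0), max(-shift, 0)
--         while i1 < len(p1) and i2 < len(p2):
--             if p1[i1] == p2[i2]:
--                 words = [a for a, b in zip(p1[i1:], p2[i2:]) if a == b]
--                 cand = ' '.join(words)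
--                 key = (-len(cand), i1, i2)
--                 if best is None or key < best[0]:
--                     best = (key, cand)
--                 break
--             i1 += 1
--             i2 += 1
--     return None if best is None else best[1]
-- ===== Notes on version B (the rewrite author's own statement) =====
-- stated objective: alternative
-- what changed: B finds the longest common aligned word run by a diagonal sweep (one candidate per alignment shift, taking only the first match on each diagonal, which provably dominates later ones) instead of A's one candidate per matching word pair with collect-and-sort, and selects the most frequent common part with max(items, key=count) instead of sorting the dict items.
import Mathlib
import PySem

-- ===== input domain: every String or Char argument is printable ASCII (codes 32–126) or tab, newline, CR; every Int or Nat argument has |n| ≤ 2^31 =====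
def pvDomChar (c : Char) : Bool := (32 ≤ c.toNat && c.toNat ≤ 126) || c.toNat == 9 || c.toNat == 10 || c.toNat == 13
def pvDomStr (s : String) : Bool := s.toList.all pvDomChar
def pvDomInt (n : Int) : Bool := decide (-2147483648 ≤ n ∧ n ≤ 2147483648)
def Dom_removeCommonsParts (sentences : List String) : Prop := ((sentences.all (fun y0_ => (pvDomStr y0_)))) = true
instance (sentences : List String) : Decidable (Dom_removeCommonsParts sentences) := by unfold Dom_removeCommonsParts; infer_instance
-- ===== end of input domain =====

-- B finds the longest aligned word match by a diagonal sweep (one candidate per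
-- alignment shift) instead of A's one candidate per matching word pair, and picks
-- the most frequent common part with max(...) instead of sort-and-take-first
-- (objective: alternative); same return value on every input.


-- ===== PORT A =====
-- substring(parts1, parts2): loop over enumerate(parts1); the try/except breaks exactly
-- when parts2[index] raises IndexError (pyGet? = none); parts1[index] is part1 itself.
def pySubstringGo (parts2 : List String) : List (Int × String) → List String → List String
  | [], acc => acc
  | (idx, part1) :: rest, acc =>
    match PySem.List.pyGet? parts2 idx with
    | none => acc
    | some p2 =>
      if part1 == p2 then pySubstringGo parts2 rest (acc ++ [part1])
      else pySubstringGo parts2 rest acc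

def pySubstring (parts1 parts2 : List String) : String :=
  PySem.Str.join " " (pySubstringGo parts2 (PySem.List.enumerate parts1 0) [])

def pyLongestSubstringFinder (string1 string2 : String) : Option String :=
  let parts1 := PySem.Str.split₀ string1
  let parts2 := PySem.Str.split₀ string2
  let candidates :=
    (PySem.List.enumerate parts1 0).foldl (fun acc p =>
      (PySem.List.enumerate parts2 0).foldl (fun acc2 q =>
        if p.2 == q.2 then
          acc2 ++ [pySubstring (PySem.List.slice parts1 (some p.1) none)
                               (PySem.List.slice parts2 (some q.1) none)]
        else acc2) acc) []
  if candidates = [] then none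
  else (PySem.List.sorted candidates (fun s => PySem.Str.len s) true).head?

-- 'if commonSubString and len(commonSubString) > 10': str truthiness is len ≠ 0
def removeCommonsParts (sentences : List String) : List String :=
  let commons : PySem.Dict String Int :=
    (PySem.List.enumerate sentences 0).foldl (fun d p =>
      (PySem.List.slice sentences (some (p.1 + 1)) none).foldl (fun d2 s2 =>
        if p.2 ≠ s2 then
          match pyLongestSubstringFinder p.2 s2 with
          | none => d2
          | some c =>
            if PySem.Str.len c ≠ 0 ∧ 10 < PySem.Str.len c then
              let d3 := if d2.contains c then d2 else d2.insert c 0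
              d3.insert c (d3.getD c 0 + 1)
            else d2
        else d2) d) PySem.Dict.empty
  if commons.items = [] then sentences
  else
    sentences.map (fun s =>
      PySem.Str.replace s
        (PySem.List.pyGetD (PySem.List.sorted commons.items (fun p => p.2) true) 0 ("", 0)).1 "")

-- ===== PORT B =====
-- '[a for a, b in zip(p1[i1:], p2[i2:]) if a == b]' joined with ' '
def altWords (p1 p2 : List String) : String :=
  PySem.Str.join " " (((p1.zip p2).filter (fun ab => ab.1 == ab.2)).map (fun ab => ab.1))

-- Python's tuple '<' on the (int, int, int) keys, ported by hand: lexicographic (exact)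
def keyLt (a b : Int × Int × Int) : Bool :=
  a.1 < b.1 || (a.1 == b.1 && (a.2.1 < b.2.1 || (a.2.1 == b.2.1 && a.2.2 < b.2.2)))

-- Source B's inner 'while i1 < len(p1) and i2 < len(p2)' loop; i1, i2 start at
-- max(shift,0)/max(-shift,0) ≥ 0, so they are carried as Nat indices.
def diagScan (p1 p2 : List String) (i1 i2 : Nat)
    (best : Option ((Int × Int × Int) × String)) : Option ((Int × Int × Int) × String) :=
  if h : i1 < p1.length ∧ i2 < p2.length then
    if p1[i1]'h.1 == p2[i2]'h.2 then
      let cand := altWords (PySem.List.slice p1 (some (i1 : Int)) none)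
                           (PySem.List.slice p2 (some (i2 : Int)) none)
      let key : Int × Int × Int := (-(PySem.Str.len cand), (i1 : Int), (i2 : Int))
      match best with
      | none => some (key, cand)
      | some b => if keyLt key b.1 then some (key, cand) else some b
    else diagScan p1 p2 (i1 + 1) (i2 + 1) best
  else best
termination_by p1.length - i1

def altLongestCommon (s1 s2 : String) : Option String :=
  let p1 := PySem.Str.split₀ s1
  let p2 := PySem.Str.split₀ s2
  let best :=
    (PySem.List.pyRange (-(PySem.List.len p2) + 1) (PySem.List.len p1) 1).foldl
      (fun best shift =>
        diagScan p1 p2 (max shift 0).toNat (max (-shift) 0).toNat best) none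
  match best with
  | none => none
  | some b => some b.2

def removeCommonsParts_alt (sentences : List String) : List String :=
  let n := PySem.List.len sentences
  let commons : PySem.Dict String Int :=
    (PySem.List.pyRange 0 n 1).foldl (fun d i =>
      (PySem.List.pyRange (i + 1) n 1).foldl (fun d2 j =>
        if PySem.List.pyGetD sentences i "" ≠ PySem.List.pyGetD sentences j "" then
          match altLongestCommon (PySem.List.pyGetD sentences i "")
                                 (PySem.List.pyGetD sentences j "") with
          | none => d2
          | some c =>
            if 10 < PySem.Str.len c then d2.insert c (d2.getD c 0 + 1) else d2
        else d2) d) PySem.Dict.empty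
  if commons.items = [] then sentences
  else
    match PySem.List.max? commons.items (fun kv => kv.2) with
    | none => sentences
    | some kv => sentences.map (fun s => PySem.Str.replace s kv.1 "")

-- ===== PRECONDITION & SPEC =====
def Spec_removeCommonsParts (sentences : List String) (out : List String) : Prop := out = removeCommonsParts_alt sentences
instance (sentences : List String) (out : List String) : Decidable (Spec_removeCommonsParts sentences out) := by unfold Spec_removeCommonsParts; infer_instance

-- ===== CLAIM (what is proved, stated in full; the proofs are below) =====
def Claim_equal_removeCommonsParts : Prop := ∀ (sentences : List String), Dom_removeCommonsParts sentences → Spec_removeCommonsParts sentences (removeCommonsParts sentences)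

-- ===== LEMMAS AND PROOFS =====

-- proof-side notions: positions, candidates, keys
def posLt (q r : Int × Int) : Prop := q.1 < r.1 ∨ (q.1 = r.1 ∧ q.2 < r.2)

def candP (p1 p2 : List String) (q : Int × Int) : String :=
  altWords (PySem.List.slice p1 (some q.1) none) (PySem.List.slice p2 (some q.2) none)

def keyP (p1 p2 : List String) (q : Int × Int) : Int × Int × Int :=
  (-(PySem.Str.len (candP p1 p2 q)), q.1, q.2)

-- first-maximum step (selection by strict '>')
def pvMax {α : Type} (key : α → Int) : Option α → α → Option α
  | none, x => some x
  | some y, x => if key y < key x then some x else some y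

-- first-minimum-by-key step on positions
def minStep (p1 p2 : List String) : Option (Int × Int) → (Int × Int) → Option (Int × Int)
  | none, q => some q
  | some p, q => if keyLt (keyP p1 p2 q) (keyP p1 p2 p) then some q else some p

-- matching positions, in A's enumeration order
def mPos (p1 p2 : List String) : List (Int × Int) :=
  (PySem.List.pyRange 0 (PySem.List.len p1) 1).flatMap (fun i1 =>
    ((PySem.List.pyRange 0 (PySem.List.len p2) 1).filter
      (fun i2 => PySem.List.pyGetD p1 i1 "" == PySem.List.pyGetD p2 i2 "")).map
      (fun i2 => (i1, i2)))

-- the diagonal representatives, in B's enumeration order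
def dFind (p1 p2 : List String) (i1 i2 : Nat) : Option (Nat × Nat) :=
  if h : i1 < p1.length ∧ i2 < p2.length then
    if p1[i1]'h.1 == p2[i2]'h.2 then some (i1, i2) else dFind p1 p2 (i1 + 1) (i2 + 1)
  else none
termination_by p1.length - i1

def dPos (p1 p2 : List String) : List (Int × Int) :=
  (PySem.List.pyRange (-(PySem.List.len p2) + 1) (PySem.List.len p1) 1).filterMap
    (fun s => (dFind p1 p2 (max s 0).toNat (max (-s) 0).toNat).map
      (fun d => ((d.1 : Int), (d.2 : Int))))

def isMatch (p1 p2 : List String) (q : Int × Int) : Prop :=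
  0 ≤ q.1 ∧ q.1 < (p1.length : Int) ∧ 0 ≤ q.2 ∧ q.2 < (p2.length : Int) ∧
    PySem.List.pyGetD p1 q.1 "" = PySem.List.pyGetD p2 q.2 ""

theorem keyLt_iff (a b : Int × Int × Int) : keyLt a b = true ↔
    a.1 < b.1 ∨ (a.1 = b.1 ∧ (a.2.1 < b.2.1 ∨ (a.2.1 = b.2.1 ∧ a.2.2 < b.2.2))) := by
  simp [keyLt, decide_eq_true_eq]

theorem keyLt_irrefl (a : Int × Int × Int) : keyLt a a = false := by
  rw [← Bool.not_eq_true, keyLt_iff]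
  omega

theorem keyLt_trans {a b c : Int × Int × Int} (h1 : keyLt a b = true) (h2 : keyLt b c = true) :
    keyLt a c = true := by
  rw [keyLt_iff] at h1 h2 ⊢
  omega

theorem keyLt_neg_total {a b : Int × Int × Int} (h1 : keyLt a b = false) (h2 : keyLt b a = false) :
    a = b := by
  rw [← Bool.not_eq_true, keyLt_iff] at h1 h2
  obtain ⟨a1, a2, a3⟩ := a
  obtain ⟨b1, b2, b3⟩ := b
  simp only [Prod.mk.injEq]
  simp only at h1 h2
  omega

theorem keyLt_contra {a b c : Int × Int × Int} (h1 : keyLt b a = false)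
    (h2 : keyLt c b = false) (h3 : keyLt c a = true) : False := by
  rw [← Bool.not_eq_true, keyLt_iff] at h1 h2
  rw [keyLt_iff] at h3
  obtain ⟨a1, a2, a3⟩ := a
  obtain ⟨b1, b2, b3⟩ := b
  obtain ⟨c1, c2, c3⟩ := c
  simp only at h1 h2 h3
  omega

theorem keyP_inj (p1 p2 : List String) {q r : Int × Int}
    (h : keyP p1 p2 q = keyP p1 p2 r) : q = r := by
  obtain ⟨q1, q2⟩ := q
  obtain ⟨r1, r2⟩ := r
  simp only [keyP, Prod.mk.injEq] at h
  simp [h.2.1, h.2.2]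

theorem keyLt_pos (p1 p2 : List String) {p q : Int × Int} (h : posLt p q) :
    (keyLt (keyP p1 p2 q) (keyP p1 p2 p) = true) ↔
    PySem.Str.len (candP p1 p2 p) < PySem.Str.len (candP p1 p2 q) := by
  obtain ⟨q1, q2⟩ := q
  obtain ⟨p1', p2'⟩ := p
  rw [keyLt_iff]
  simp only [keyP]
  simp only [posLt] at h
  omega

theorem head_foldl_insertBy {α : Type} (key : α → Int) (l : List α) (acc : List α) :
    (l.foldl (fun a x => PySem.List.insertBy (fun a b => decide (key b < key a)) x a) acc).head? =
    l.foldl (pvMax key) acc.head? := by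
  induction l generalizing acc with
  | nil => rfl
  | cons x t ih =>
    simp only [List.foldl_cons]
    rw [ih]
    congr 1
    cases acc with
    | nil => simp [PySem.List.insertBy, pvMax]
    | cons y ys =>
      simp only [PySem.List.insertBy]
      by_cases h : key y < key x
      · simp [pvMax, h]
      · simp [pvMax, h]

theorem head_sorted_rev {α : Type} (key : α → Int) (l : List α) :
    (PySem.List.sorted l key true).head? = l.foldl (pvMax key) none := by
  have h := head_foldl_insertBy key l []
  simpa [PySem.List.sorted] using h

theorem pySubstringGo_spec (p2 : List String) (p1 : List String) (k : Nat) (acc : List String) :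
    pySubstringGo p2 (PySem.List.enumerate p1 (k : Int)) acc =
    acc ++ (((p1.zip (p2.drop k)).filter (fun ab => ab.1 == ab.2)).map (fun ab => ab.1)) := by
  induction p1 generalizing k acc with
  | nil => simp [pySubstringGo, PySem.List.enumerate_nil]
  | cons x xs ih =>
    rw [PySem.List.enumerate_cons]
    simp only [pySubstringGo, PySem.List.pyGet?_natCast]
    cases hk : p2[k]? with
    | none =>
      have hlen : p2.length <= k := List.getElem?_eq_none_iff.mp hk
      simp [List.drop_eq_nil_iff.mpr hlen]
    | some y =>
      have hklt : k < p2.length := by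
        rcases Nat.lt_or_ge k p2.length with h | h
        · exact h
        · rw [List.getElem?_eq_none_iff.mpr h] at hk; cases hk
      have hdrop : p2.drop k = y :: p2.drop (k + 1) := by
        rw [List.drop_eq_getElem_cons hklt]
        have hg := List.getElem?_eq_getElem hklt
        rw [hk] at hg
        rw [Option.some.injEq] at hg
        rw [hg]
      have hcast : (k : Int) + 1 = ((k + 1 : Nat) : Int) := by push_cast; ring
      rw [hdrop, hcast]
      dsimp only
      by_cases hxy : (x == y) = true
      · rw [if_pos hxy, ih]
        simp [hxy]
      · rw [if_neg hxy, ih]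
        simp [hxy]

theorem pySubstring_eq (p1 p2 : List String) : pySubstring p1 p2 = altWords p1 p2 := by
  unfold pySubstring altWords
  have h := pySubstringGo_spec p2 p1 0 []
  simp only [Nat.cast_zero, List.drop_zero, List.nil_append] at h
  rw [h]

-- character-level length of a join of two nonempty blocks
theorem join_append_len (sep : List Char) (a b : List (List Char)) (ha : a ≠ []) (hb : b ≠ []) :
    (PySem.Chars.join sep (a ++ b)).length =
    (PySem.Chars.join sep a).length + sep.length + (PySem.Chars.join sep b).length := by
  induction a with
  | nil => exact absurd rfl ha
  | cons x a' ih =>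
    cases a' with
    | nil =>
      cases b with
      | nil => exact absurd rfl hb
      | cons y b' =>
        rw [List.singleton_append, PySem.Chars.join_cons_cons, PySem.Chars.join_singleton]
        simp only [List.length_append]
    | cons z a'' =>
      have ih' := ih (List.cons_ne_nil z a'')
      simp only [List.cons_append] at ih' ⊢
      rw [PySem.Chars.join_cons_cons, PySem.Chars.join_cons_cons]
      simp only [List.length_append] at ih' ⊢
      omega

theorem zip_drop {α β : Type} (l : List α) (l' : List β) (n : Nat) :
    (l.zip l').drop n = (l.drop n).zip (l'.drop n) := by
  induction n generalizing l l' with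
  | zero => simp
  | succ m ih =>
    cases l with
    | nil => simp
    | cons a t =>
      cases l' with
      | nil => simp
      | cons b t' => simpa using ih t t'

theorem candP_drop (p1 p2 : List String) (m n : Nat) :
    candP p1 p2 ((m : Int), (n : Int)) =
    PySem.Str.join " " ((((p1.drop m).zip (p2.drop n)).filter
      (fun ab => ab.1 == ab.2)).map (fun ab => ab.1)) := by
  simp [candP, altWords, PySem.List.slice_from_natCast]

-- strict decrease along a diagonal
theorem candP_len_lt (p1 p2 : List String) (a1 a2 : Int) (k : Int) (hk : 0 < k)
    (h1 : isMatch p1 p2 (a1, a2)) (h2 : isMatch p1 p2 (a1 + k, a2 + k)) :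
    PySem.Str.len (candP p1 p2 (a1 + k, a2 + k)) < PySem.Str.len (candP p1 p2 (a1, a2)) := by
  obtain ⟨h10, h11, h12, h13, h14⟩ := h1
  obtain ⟨h20, h21, h22, h23, h24⟩ := h2
  simp only at h10 h11 h12 h13 h14 h20 h21 h22 h23 h24
  have hmlt : a1.toNat < p1.length := by omega
  have hnlt : a2.toNat < p2.length := by omega
  have hmKlt : a1.toNat + k.toNat < p1.length := by omega
  have hnKlt : a2.toNat + k.toNat < p2.length := by omega
  have e1 : p1[a1.toNat]'hmlt = p2[a2.toNat]'hnlt := by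
    rwa [PySem.List.pyGetD_eq_getElem p1 "" h10 h11, PySem.List.pyGetD_eq_getElem p2 "" h12 h13] at h14
  have e2 : p1[a1.toNat + k.toNat]'hmKlt = p2[a2.toNat + k.toNat]'hnKlt := by
    rw [PySem.List.pyGetD_eq_getElem p1 "" h20 h21, PySem.List.pyGetD_eq_getElem p2 "" h22 h23] at h24
    have c1 : (a1 + k).toNat = a1.toNat + k.toNat := by omega
    have c2 : (a2 + k).toNat = a2.toNat + k.toNat := by omega
    simp only [c1, c2] at h24
    exact h24
  -- the zipped tail pair lists
  have hz : (p1.drop a1.toNat).zip (p2.drop a2.toNat) =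
      (p1[a1.toNat]'hmlt, p2[a2.toNat]'hnlt) ::
        ((p1.drop (a1.toNat + 1)).zip (p2.drop (a2.toNat + 1))) := by
    rw [List.drop_eq_getElem_cons hmlt, List.drop_eq_getElem_cons hnlt, List.zip_cons_cons]
  have hdz : ((p1.drop a1.toNat).zip (p2.drop a2.toNat)).drop k.toNat =
      (p1[a1.toNat + k.toNat]'hmKlt, p2[a2.toNat + k.toNat]'hnKlt) ::
        ((p1.drop (a1.toNat + k.toNat + 1)).zip (p2.drop (a2.toNat + k.toNat + 1))) := by
    rw [zip_drop, List.drop_drop, List.drop_drop,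
      List.drop_eq_getElem_cons hmKlt, List.drop_eq_getElem_cons hnKlt, List.zip_cons_cons]
  have hcand2 : candP p1 p2 (a1 + k, a2 + k) =
      PySem.Str.join " " ((((p1.drop (a1.toNat + k.toNat)).zip (p2.drop (a2.toNat + k.toNat))).filter
        (fun ab => ab.1 == ab.2)).map (fun ab => ab.1)) := by
    have c1 : a1 + k = ((a1.toNat + k.toNat : Nat) : Int) := by omega
    have c2 : a2 + k = ((a2.toNat + k.toNat : Nat) : Int) := by omega
    rw [c1, c2, candP_drop]
  have hcand1 : candP p1 p2 (a1, a2) =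
      PySem.Str.join " " ((((p1.drop a1.toNat).zip (p2.drop a2.toNat)).filter
        (fun ab => ab.1 == ab.2)).map (fun ab => ab.1)) := by
    have c1 : a1 = ((a1.toNat : Nat) : Int) := by omega
    have c2 : a2 = ((a2.toNat : Nat) : Int) := by omega
    conv_lhs => rw [c1, c2]
    exact candP_drop _ _ _ _
  rw [hcand1, hcand2]
  set z := (p1.drop a1.toNat).zip (p2.drop a2.toNat) with hzdef
  set F : String × String → Bool := fun ab => ab.1 == ab.2 with hF
  have hdz' : (p1.drop (a1.toNat + k.toNat)).zip (p2.drop (a2.toNat + k.toNat)) = z.drop k.toNat := by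
    rw [zip_drop, List.drop_drop, List.drop_drop]
  rw [hdz']
  -- split the full filtered list at position k
  have hsplit : (z.filter F).map (fun ab => ab.1) =
      ((z.take k.toNat).filter F).map (fun ab => ab.1) ++
      ((z.drop k.toNat).filter F).map (fun ab => ab.1) := by
    conv_lhs => rw [← List.take_append_drop k.toNat z]
    rw [List.filter_append, List.map_append]
  -- the first block is nonempty
  have hKpos : 0 < k.toNat := by omega
  have htake : z.take k.toNat = (p1[a1.toNat]'hmlt, p2[a2.toNat]'hnlt) ::
      ((p1.drop (a1.toNat + 1)).zip (p2.drop (a2.toNat + 1))).take (k.toNat - 1) := by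
    rw [hz]
    obtain ⟨K', hK'⟩ : ∃ K', k.toNat = K' + 1 := ⟨k.toNat - 1, by omega⟩
    rw [hK']
    simp [List.take_succ_cons]
  have hAne : ((z.take k.toNat).filter F).map (fun ab : String × String => ab.1) ≠ [] := by
    have hmem : (p1[a1.toNat]'hmlt, p2[a2.toNat]'hnlt) ∈ (z.take k.toNat).filter F := by
      rw [List.mem_filter]
      exact ⟨by rw [htake]; exact List.mem_cons_self, by simp [hF, e1]⟩
    intro hcon
    rw [List.map_eq_nil_iff] at hcon
    rw [hcon] at hmem
    exact absurd hmem (List.not_mem_nil)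
  have hBne : ((z.drop k.toNat).filter F).map (fun ab : String × String => ab.1) ≠ [] := by
    have hmem : (p1[a1.toNat + k.toNat]'hmKlt, p2[a2.toNat + k.toNat]'hnKlt) ∈
        (z.drop k.toNat).filter F := by
      rw [List.mem_filter]
      exact ⟨by rw [hdz]; exact List.mem_cons_self, by simp [hF, e2]⟩
    intro hcon
    rw [List.map_eq_nil_iff] at hcon
    rw [hcon] at hmem
    exact absurd hmem (List.not_mem_nil)
  rw [hsplit, PySem.Str.len_eq, PySem.Str.len_eq, PySem.Str.toList_join, PySem.Str.toList_join,
      List.map_append]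
  rw [join_append_len " ".toList _ _
      (by simpa using hAne) (by simpa using hBne)]
  have hsep : ([' '] : List Char).length = 1 := rfl
  push_cast
  omega

-- pvMax over candidates of a posLt-sorted position list = first minimum by keyP
theorem pvMax_fold_aux (p1 p2 : List String) (P : List (Int × Int)) (p0 : Int × Int)
    (h0 : ∀ q ∈ P, posLt p0 q) (hP : P.Pairwise posLt) :
    (P.map (candP p1 p2)).foldl (pvMax PySem.Str.len) (some (candP p1 p2 p0)) =
    (P.foldl (minStep p1 p2) (some p0)).map (candP p1 p2) := by
  induction P generalizing p0 with
  | nil => rfl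
  | cons q t ih =>
    simp only [List.map_cons, List.foldl_cons]
    have hpos : posLt p0 q := h0 q List.mem_cons_self
    have hkey := keyLt_pos p1 p2 hpos
    rw [List.pairwise_cons] at hP
    have e1 : pvMax PySem.Str.len (some (candP p1 p2 p0)) (candP p1 p2 q) =
        if PySem.Str.len (candP p1 p2 p0) < PySem.Str.len (candP p1 p2 q)
        then some (candP p1 p2 q) else some (candP p1 p2 p0) := rfl
    have e2 : minStep p1 p2 (some p0) q =
        if keyLt (keyP p1 p2 q) (keyP p1 p2 p0) = true then some q else some p0 := by
      simp only [minStep]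
    by_cases hlt : PySem.Str.len (candP p1 p2 p0) < PySem.Str.len (candP p1 p2 q)
    · rw [e1, if_pos hlt, e2, if_pos (hkey.mpr hlt)]
      exact ih q hP.1 hP.2
    · rw [e1, if_neg hlt, e2, if_neg (fun hc => hlt (hkey.mp hc))]
      exact ih p0 (fun r hr => h0 r (List.mem_cons_of_mem _ hr)) hP.2

theorem pvMax_fold_eq (p1 p2 : List String) (P : List (Int × Int)) (hP : P.Pairwise posLt) :
    (P.map (candP p1 p2)).foldl (pvMax PySem.Str.len) none =
    (P.foldl (minStep p1 p2) none).map (candP p1 p2) := by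
  cases P with
  | nil => rfl
  | cons q t =>
    simp only [List.map_cons, List.foldl_cons]
    rw [show pvMax PySem.Str.len none (candP p1 p2 q) = some (candP p1 p2 q) from rfl,
        show minStep p1 p2 none q = some q from rfl]
    rw [List.pairwise_cons] at hP
    exact pvMax_fold_aux p1 p2 t q hP.1 hP.2

theorem mPos_pairwise (p1 p2 : List String) : (mPos p1 p2).Pairwise posLt := by
  unfold mPos
  rw [List.pairwise_flatMap]
  constructor
  · intro i1 _
    rw [List.pairwise_map]
    exact ((PySem.List.pairwise_lt_pyRange_one 0 (PySem.List.len p2)).filter _).imp (fun h => Or.inr ⟨rfl, h⟩)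
  · refine (PySem.List.pairwise_lt_pyRange_one 0 (PySem.List.len p1)).imp ?_
    intro a b hab x hx y hy
    obtain ⟨xi, _, rfl⟩ := List.mem_map.mp hx
    obtain ⟨yi, _, rfl⟩ := List.mem_map.mp hy
    exact Or.inl hab

-- A's candidate list = candP over mPos (positions in A's order)
theorem lsfA_eq (s1 s2 : String) :
    pyLongestSubstringFinder s1 s2 =
    ((mPos (PySem.Str.split₀ s1) (PySem.Str.split₀ s2)).foldl
      (minStep (PySem.Str.split₀ s1) (PySem.Str.split₀ s2)) none).map
        (candP (PySem.Str.split₀ s1) (PySem.Str.split₀ s2)) := by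
  have hC : ((PySem.List.pyRange 0 (PySem.List.len (PySem.Str.split₀ s1)) 1).flatMap
      (fun i1 => ((PySem.List.pyRange 0 (PySem.List.len (PySem.Str.split₀ s2)) 1).filter
        (fun i2 => PySem.List.pyGetD (PySem.Str.split₀ s1) i1 "" ==
                   PySem.List.pyGetD (PySem.Str.split₀ s2) i2 "")).map
        (fun i2 => altWords
          (PySem.List.slice (PySem.Str.split₀ s1) (some i1) none)
          (PySem.List.slice (PySem.Str.split₀ s2) (some i2) none)))) =
      (mPos (PySem.Str.split₀ s1) (PySem.Str.split₀ s2)).map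
        (candP (PySem.Str.split₀ s1) (PySem.Str.split₀ s2)) := by
    rw [mPos, List.map_flatMap]
    simp only [List.map_map, Function.comp_def, candP]
  simp only [pyLongestSubstringFinder]
  rw [PySem.List.enumerate_eq_map_pyRange (xs := PySem.Str.split₀ s1) (d := ""),
      PySem.List.enumerate_eq_map_pyRange (xs := PySem.Str.split₀ s2) (d := "")]
  simp only [List.foldl_map, PySem.List.foldl_append_if, PySem.List.foldl_append_eq_flatMap,
    List.nil_append, pySubstring_eq]
  rw [hC]
  by_cases hc : (mPos (PySem.Str.split₀ s1) (PySem.Str.split₀ s2)).map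
      (candP (PySem.Str.split₀ s1) (PySem.Str.split₀ s2)) = []
  · rw [if_pos hc]
    have : mPos (PySem.Str.split₀ s1) (PySem.Str.split₀ s2) = [] := by
      exact List.map_eq_nil_iff.mp hc
    rw [this]
    rfl
  · rw [if_neg hc, head_sorted_rev,
      pvMax_fold_eq _ _ _ (mPos_pairwise (PySem.Str.split₀ s1) (PySem.Str.split₀ s2))]

theorem diagScan_eq (p1 p2 : List String) (i1 i2 : Nat) (b : Option (Int × Int)) :
    diagScan p1 p2 i1 i2 (b.map (fun q => (keyP p1 p2 q, candP p1 p2 q))) =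
    ((match dFind p1 p2 i1 i2 with
      | none => b
      | some d => minStep p1 p2 b ((d.1 : Int), (d.2 : Int))).map
        (fun q => (keyP p1 p2 q, candP p1 p2 q))) := by
  fun_induction dFind p1 p2 i1 i2 with
  | case1 i1 i2 h hbeq =>
    rw [diagScan]
    rw [dif_pos h, if_pos hbeq]
    cases b with
    | none => rfl
    | some p =>
      simp only [Option.map_some]
      show (if keyLt (keyP p1 p2 ((i1:Int),(i2:Int))) (keyP p1 p2 p) = true
            then some (keyP p1 p2 ((i1:Int),(i2:Int)), candP p1 p2 ((i1:Int),(i2:Int)))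
            else some (keyP p1 p2 p, candP p1 p2 p)) =
        (minStep p1 p2 (some p) ((i1:Int),(i2:Int))).map (fun q => (keyP p1 p2 q, candP p1 p2 q))
      rw [show minStep p1 p2 (some p) ((i1:Int),(i2:Int)) =
        if keyLt (keyP p1 p2 ((i1:Int),(i2:Int))) (keyP p1 p2 p) = true
        then some ((i1:Int),(i2:Int)) else some p
        from by simp only [minStep]]
      by_cases hk : keyLt (keyP p1 p2 ((i1:Int),(i2:Int))) (keyP p1 p2 p) = true
      · rw [if_pos hk, if_pos hk]
        rfl
      · rw [if_neg hk, if_neg hk]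
        rfl
  | case2 i1 i2 h hbeq ih =>
    rw [diagScan, dif_pos h, if_neg hbeq]
    exact ih
  | case3 i1 i2 h =>
    rw [diagScan, dif_neg h]

theorem foldl_diagScan (p1 p2 : List String) (shifts : List Int) (b : Option (Int × Int)) :
    shifts.foldl (fun best s => diagScan p1 p2 (max s 0).toNat (max (-s) 0).toNat best)
      (b.map (fun q => (keyP p1 p2 q, candP p1 p2 q))) =
    ((shifts.filterMap (fun s => (dFind p1 p2 (max s 0).toNat (max (-s) 0).toNat).map
        (fun d => ((d.1 : Int), (d.2 : Int))))).foldl (minStep p1 p2) b).map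
      (fun q => (keyP p1 p2 q, candP p1 p2 q)) := by
  induction shifts generalizing b with
  | nil => rfl
  | cons s t ih =>
    simp only [List.foldl_cons, List.filterMap_cons]
    rw [diagScan_eq]
    cases hd : dFind p1 p2 (max s 0).toNat (max (-s) 0).toNat with
    | none => simpa using ih b
    | some d => simpa using ih (minStep p1 p2 b ((d.1 : Int), (d.2 : Int)))

-- B's fold over shifts = first minimum by keyP over dPos
theorem altB_eq (s1 s2 : String) :
    altLongestCommon s1 s2 =
    ((dPos (PySem.Str.split₀ s1) (PySem.Str.split₀ s2)).foldl
      (minStep (PySem.Str.split₀ s1) (PySem.Str.split₀ s2)) none).map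
        (candP (PySem.Str.split₀ s1) (PySem.Str.split₀ s2)) := by
  simp only [altLongestCommon]
  have h := foldl_diagScan (PySem.Str.split₀ s1) (PySem.Str.split₀ s2)
      (PySem.List.pyRange (-(PySem.List.len (PySem.Str.split₀ s2)) + 1)
        (PySem.List.len (PySem.Str.split₀ s1)) 1) none
  simp only [Option.map_none] at h
  rw [h, ← dPos]
  cases (dPos (PySem.Str.split₀ s1) (PySem.Str.split₀ s2)).foldl
      (minStep (PySem.Str.split₀ s1) (PySem.Str.split₀ s2)) none <;> rfl

theorem mem_mPos_iff (p1 p2 : List String) (q : Int × Int) :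
    q ∈ mPos p1 p2 ↔ isMatch p1 p2 q := by
  obtain ⟨q1, q2⟩ := q
  unfold mPos isMatch
  simp only [List.mem_flatMap, List.mem_map, List.mem_filter, PySem.List.mem_pyRange_one,
    PySem.List.len_eq, Prod.mk.injEq, beq_iff_eq]
  constructor
  · rintro ⟨i1, ⟨h0, h1⟩, i2, ⟨⟨h2, h3⟩, hbeq⟩, rfl, rfl⟩
    exact ⟨h0, h1, h2, h3, hbeq⟩
  · rintro ⟨h0, h1, h2, h3, hbeq⟩
    exact ⟨q1, ⟨h0, h1⟩, q2, ⟨⟨h2, h3⟩, hbeq⟩, rfl, rfl⟩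

theorem dFind_some_spec (p1 p2 : List String) (i1 i2 : Nat) (d : Nat × Nat)
    (h : dFind p1 p2 i1 i2 = some d) :
    ∃ k, d = (i1 + k, i2 + k) ∧ isMatch p1 p2 ((d.1 : Int), (d.2 : Int)) := by
  fun_induction dFind p1 p2 i1 i2 with
  | case1 i1 i2 hb hbeq =>
    rw [Option.some.injEq] at h
    subst h
    refine ⟨0, by simp, ?_⟩
    dsimp only [isMatch]
    refine ⟨by omega, by exact_mod_cast hb.1, by omega, by exact_mod_cast hb.2, ?_⟩
    simp only [PySem.List.pyGetD_natCast, List.getD_eq_getElem _ _ hb.1,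
      List.getD_eq_getElem _ _ hb.2]
    exact beq_iff_eq.mp hbeq
  | case2 i1 i2 hb hbeq ih =>
    obtain ⟨k, hk, hm⟩ := ih h
    exact ⟨k + 1, by rw [hk]; simp only [Prod.mk.injEq]; omega, hm⟩
  | case3 i1 i2 hb => cases h

theorem dFind_min (p1 p2 : List String) (i1 i2 k : Nat)
    (hb1 : i1 + k < p1.length) (hb2 : i2 + k < p2.length)
    (hm : p1.getD (i1 + k) "" = p2.getD (i2 + k) "") :
    ∃ j, j ≤ k ∧ dFind p1 p2 i1 i2 = some (i1 + j, i2 + j) := by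
  induction k generalizing i1 i2 with
  | zero =>
    simp only [Nat.add_zero] at hb1 hb2 hm
    refine ⟨0, le_refl 0, ?_⟩
    have hwords : (p1[i1]'hb1 == p2[i2]'hb2) = true := by
      rw [beq_iff_eq, ← List.getD_eq_getElem p1 "" hb1, ← List.getD_eq_getElem p2 "" hb2]
      exact hm
    rw [dFind, dif_pos ⟨hb1, hb2⟩, if_pos hwords]
    simp
  | succ k' ih =>
    have hcond : i1 < p1.length ∧ i2 < p2.length := ⟨by omega, by omega⟩
    by_cases hbeq : (p1[i1]'hcond.1 == p2[i2]'hcond.2) = true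
    · exact ⟨0, by omega, by rw [dFind, dif_pos hcond, if_pos hbeq]; simp⟩
    · have hm' : p1.getD (i1 + 1 + k') "" = p2.getD (i2 + 1 + k') "" := by
        have c1 : i1 + 1 + k' = i1 + (k' + 1) := by omega
        have c2 : i2 + 1 + k' = i2 + (k' + 1) := by omega
        rw [c1, c2]; exact hm
      obtain ⟨j, hj, hfind⟩ := ih (i1 + 1) (i2 + 1) (by omega) (by omega) hm'
      refine ⟨j + 1, by omega, ?_⟩
      rw [dFind, dif_pos hcond, if_neg hbeq, hfind]
      congr 1
      simp only [Prod.mk.injEq]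
      omega

theorem mem_dPos_match (p1 p2 : List String) (x : Int × Int) (hx : x ∈ dPos p1 p2) :
    isMatch p1 p2 x := by
  unfold dPos at hx
  rw [List.mem_filterMap] at hx
  obtain ⟨s, _, hs⟩ := hx
  rw [Option.map_eq_some_iff] at hs
  obtain ⟨d, hd, rfl⟩ := hs
  obtain ⟨k, _, hm⟩ := dFind_some_spec p1 p2 _ _ d hd
  exact hm

theorem dominate (p1 p2 : List String) (q : Int × Int) (hq : isMatch p1 p2 q) :
    ∃ d ∈ dPos p1 p2, d = q ∨ keyLt (keyP p1 p2 d) (keyP p1 p2 q) = true := by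
  obtain ⟨q1, q2⟩ := q
  obtain ⟨h0, h1, h2, h3, h4⟩ := hq
  simp only at h0 h1 h2 h3 h4
  set sft : Int := q1 - q2 with hsft
  set i1 : Nat := (max sft 0).toNat with hi1
  set i2 : Nat := (max (-sft) 0).toNat with hi2
  set k : Nat := (q1 - max sft 0).toNat with hk
  have hq1 : i1 + k = q1.toNat := by omega
  have hq2 : i2 + k = q2.toNat := by omega
  have hgd : p1.getD (i1 + k) "" = p2.getD (i2 + k) "" := by
    rw [hq1, hq2]
    rw [PySem.List.pyGetD_of_nonneg p1 "" h0, PySem.List.pyGetD_of_nonneg p2 "" h2] at h4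
    exact h4
  obtain ⟨j, hj, hfind⟩ := dFind_min p1 p2 i1 i2 k (by omega) (by omega) hgd
  obtain ⟨k', hk', hm'⟩ := dFind_some_spec p1 p2 i1 i2 _ hfind
  refine ⟨(((i1 + j : Nat) : Int), ((i2 + j : Nat) : Int)), ?_, ?_⟩
  · unfold dPos
    rw [List.mem_filterMap]
    refine ⟨sft, ?_, ?_⟩
    · rw [PySem.List.mem_pyRange_one]
      simp only [PySem.List.len_eq]
      omega
    · have : (max sft 0).toNat = i1 := rfl
      rw [hfind]
      rfl
  · by_cases hjk : j = k
    · left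
      subst hjk
      simp only [Prod.mk.injEq]
      omega
    · right
      have hmj : isMatch p1 p2 (((i1 + j : Nat) : Int), ((i2 + j : Nat) : Int)) := by
        simpa using hm'
      have hlt : PySem.Str.len (candP p1 p2 (q1, q2)) <
          PySem.Str.len (candP p1 p2 (((i1 + j : Nat) : Int), ((i2 + j : Nat) : Int))) := by
        have hc := candP_len_lt p1 p2 ((i1 + j : Nat) : Int) ((i2 + j : Nat) : Int)
          ((k - j : Nat) : Int) (by omega) hmj
        have c1 : ((i1 + j : Nat) : Int) + ((k - j : Nat) : Int) = q1 := by omega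
        have c2 : ((i2 + j : Nat) : Int) + ((k - j : Nat) : Int) = q2 := by omega
        rw [c1, c2] at hc
        exact hc ⟨h0, h1, h2, h3, h4⟩
      rw [keyLt_iff]
      left
      simp only [keyP]
      omega

theorem foldl_minStep_spec (p1 p2 : List String) (l : List (Int × Int)) (p0 : Int × Int) :
    ∃ r, l.foldl (minStep p1 p2) (some p0) = some r ∧ (r = p0 ∨ r ∈ l) ∧
      ∀ x, (x = p0 ∨ x ∈ l) → keyLt (keyP p1 p2 x) (keyP p1 p2 r) = false := by
  induction l generalizing p0 with
  | nil =>
    refine ⟨p0, rfl, Or.inl rfl, ?_⟩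
    rintro x (rfl | hx)
    · exact keyLt_irrefl _
    · cases hx
  | cons q t ih =>
    rw [List.foldl_cons]
    have estep : minStep p1 p2 (some p0) q =
        if keyLt (keyP p1 p2 q) (keyP p1 p2 p0) = true then some q else some p0 := by
      simp only [minStep]
    by_cases hqp : keyLt (keyP p1 p2 q) (keyP p1 p2 p0) = true
    · rw [estep, if_pos hqp]
      obtain ⟨r, hr, hrmem, hrmin⟩ := ih q
      refine ⟨r, hr, ?_, ?_⟩
      · rcases hrmem with rfl | hr2
        · exact Or.inr (List.mem_cons_self)
        · exact Or.inr (List.mem_cons_of_mem _ hr2)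
      · rintro x (rfl | hx)
        · -- x = p0 : if keyLt p0 r then with keyLt q p0 get keyLt q r, contradiction
          by_contra hcon
          rw [Bool.not_eq_false] at hcon
          have := keyLt_trans hqp hcon
          rw [hrmin q (Or.inl rfl)] at this
          cases this
        · rcases List.mem_cons.mp hx with rfl | hx2
          · exact hrmin x (Or.inl rfl)
          · exact hrmin x (Or.inr hx2)
    · rw [estep, if_neg hqp]
      obtain ⟨r, hr, hrmem, hrmin⟩ := ih p0
      refine ⟨r, hr, ?_, ?_⟩
      · rcases hrmem with rfl | hr2
        · exact Or.inl rfl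
        · exact Or.inr (List.mem_cons_of_mem _ hr2)
      · rintro x (rfl | hx)
        · exact hrmin x (Or.inl rfl)
        · rcases List.mem_cons.mp hx with rfl | hx2
          · -- x = q : from r ≤ p0 (IH) and p0 ≤ q (branch) a strict q < r is absurd
            by_contra hcon
            rw [Bool.not_eq_false] at hcon
            exact keyLt_contra (hrmin p0 (Or.inl rfl)) (eq_false_of_ne_true hqp) hcon
          · exact hrmin x (Or.inr hx2)

-- the two folds agree
theorem fold_mPos_eq_fold_dPos (p1 p2 : List String) :
    (mPos p1 p2).foldl (minStep p1 p2) none = (dPos p1 p2).foldl (minStep p1 p2) none := by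
  cases hM : mPos p1 p2 with
  | nil =>
    cases hD : dPos p1 p2 with
    | nil => rfl
    | cons dh dt =>
      exfalso
      have hm := mem_dPos_match p1 p2 dh (hD ▸ List.mem_cons_self)
      have := (mem_mPos_iff p1 p2 dh).mpr hm
      rw [hM] at this
      exact absurd this (List.not_mem_nil)
  | cons q t =>
    have hq : isMatch p1 p2 q := (mem_mPos_iff p1 p2 q).mp (hM ▸ List.mem_cons_self)
    obtain ⟨d0, hd0mem, _⟩ := dominate p1 p2 q hq
    obtain ⟨dh, dt, hD⟩ : ∃ dh dt, dPos p1 p2 = dh :: dt := by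
      cases hDp : dPos p1 p2 with
      | nil => rw [hDp] at hd0mem; exact absurd hd0mem (List.not_mem_nil)
      | cons a b => exact ⟨a, b, rfl⟩
    rw [hD, List.foldl_cons, List.foldl_cons,
      show minStep p1 p2 none q = some q from rfl,
      show minStep p1 p2 none dh = some dh from rfl]
    obtain ⟨r1, hr1, hr1mem, hr1min⟩ := foldl_minStep_spec p1 p2 t q
    obtain ⟨r2, hr2, hr2mem, hr2min⟩ := foldl_minStep_spec p1 p2 dt dh
    rw [hr1, hr2]
    -- membership translations
    have hmemM : ∀ x, (x = q ∨ x ∈ t) ↔ x ∈ mPos p1 p2 := by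
      intro x; rw [hM, List.mem_cons]
    have hmemD : ∀ x, (x = dh ∨ x ∈ dt) ↔ x ∈ dPos p1 p2 := by
      intro x; rw [hD, List.mem_cons]
    have hr2M : r2 ∈ mPos p1 p2 :=
      (mem_mPos_iff p1 p2 r2).mpr (mem_dPos_match p1 p2 r2 ((hmemD r2).mp hr2mem))
    -- r2 is minimal over all of mPos
    have hr2minM : ∀ x ∈ mPos p1 p2, keyLt (keyP p1 p2 x) (keyP p1 p2 r2) = false := by
      intro x hx
      obtain ⟨d, hdD, hdq⟩ := dominate p1 p2 x ((mem_mPos_iff p1 p2 x).mp hx)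
      have hdmin : keyLt (keyP p1 p2 d) (keyP p1 p2 r2) = false := hr2min d ((hmemD d).mpr hdD)
      rcases hdq with rfl | hdlt
      · exact hdmin
      · by_contra hcon
        rw [Bool.not_eq_false] at hcon
        have := keyLt_trans hdlt hcon
        rw [hdmin] at this
        cases this
    have e1 : keyLt (keyP p1 p2 r1) (keyP p1 p2 r2) = false :=
      hr2minM r1 ((hmemM r1).mp hr1mem)
    have e2 : keyLt (keyP p1 p2 r2) (keyP p1 p2 r1) = false :=
      hr1min r2 ((hmemM r2).mpr hr2M)
    rw [keyP_inj p1 p2 (keyLt_neg_total e2 e1)]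

theorem lsf_eq (s1 s2 : String) : pyLongestSubstringFinder s1 s2 = altLongestCommon s1 s2 := by
  rw [lsfA_eq, altB_eq, fold_mPos_eq_fold_dPos]

-- the dict-building step of A collapses to B's single insert
theorem dictStep (d : PySem.Dict String Int) (c : String) :
    ((if d.contains c then d else d.insert c 0).insert c
      ((if d.contains c then d else d.insert c 0).getD c 0 + 1)) =
    d.insert c (d.getD c 0 + 1) := by
  cases h : d.contains c with
  | true => simp
  | false =>
    simp only [Bool.false_eq_true, if_false]
    rw [PySem.Dict.getD_insert_self, PySem.Dict.insert_insert_self,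
        PySem.Dict.getD_of_not_contains d 0 h]

-- ===== VERDICT (by name: the statement is the Claim_ definition above) =====
theorem removeCommonsParts_spec : Claim_equal_removeCommonsParts := by
  unfold Claim_equal_removeCommonsParts
  intro sentences _dom
  unfold Spec_removeCommonsParts
  simp only [removeCommonsParts, removeCommonsParts_alt]
  rw [PySem.List.enumerate_eq_map_pyRange (xs := sentences) (d := "")]
  simp only [List.foldl_map]
  have hdict :
      (PySem.List.pyRange 0 (PySem.List.len sentences) 1).foldl (fun d i =>
        (PySem.List.slice sentences (some (i + 1)) none).foldl (fun d2 s2 =>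
          if PySem.List.pyGetD sentences i "" ≠ s2 then
            match pyLongestSubstringFinder (PySem.List.pyGetD sentences i "") s2 with
            | none => d2
            | some c =>
              if PySem.Str.len c ≠ 0 ∧ 10 < PySem.Str.len c then
                (if d2.contains c then d2 else d2.insert c 0).insert c
                  ((if d2.contains c then d2 else d2.insert c 0).getD c 0 + 1)
              else d2
          else d2) d) (PySem.Dict.empty : PySem.Dict String Int) =
      (PySem.List.pyRange 0 (PySem.List.len sentences) 1).foldl (fun d i =>
        (PySem.List.pyRange (i + 1) (PySem.List.len sentences) 1).foldl (fun d2 j =>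
          if PySem.List.pyGetD sentences i "" ≠ PySem.List.pyGetD sentences j "" then
            match altLongestCommon (PySem.List.pyGetD sentences i "")
                                   (PySem.List.pyGetD sentences j "") with
            | none => d2
            | some c =>
              if 10 < PySem.Str.len c then d2.insert c (d2.getD c 0 + 1) else d2
          else d2) d) (PySem.Dict.empty : PySem.Dict String Int) := by
    apply PySem.List.foldl_congr_mem
    intro d i hi
    have hi0 : (0 : Int) ≤ i := ((PySem.List.mem_pyRange_one).mp hi).1
    rw [PySem.List.slice_from sentences (by omega : (0:Int) ≤ i + 1)]
    have hin := PySem.List.foldl_pyRange_pyGetD sentences ""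
      (fun d2 s2 =>
        if PySem.List.pyGetD sentences i "" ≠ s2 then
          match altLongestCommon (PySem.List.pyGetD sentences i "") s2 with
          | none => d2
          | some c =>
            if 10 < PySem.Str.len c then d2.insert c (d2.getD c 0 + 1) else d2
        else d2)
      d (by omega : (0:Int) ≤ i + 1)
    refine Eq.trans ?_ hin.symm
    apply PySem.List.foldl_congr_mem
    intro d2 s2 _hs2
    by_cases hne : PySem.List.pyGetD sentences i "" ≠ s2
    · rw [if_pos hne, if_pos hne, lsf_eq]
      cases halt : altLongestCommon (PySem.List.pyGetD sentences i "") s2 with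
      | none => rfl
      | some c =>
        dsimp only
        by_cases h10 : 10 < PySem.Str.len c
        · rw [if_pos (show PySem.Str.len c ≠ 0 ∧ 10 < PySem.Str.len c from ⟨by omega, h10⟩),
              if_pos h10, dictStep]
        · rw [if_neg (by tauto), if_neg h10]
    · rw [if_neg hne, if_neg hne]
  rw [hdict]
  generalize (PySem.List.pyRange 0 (PySem.List.len sentences) 1).foldl (fun d i =>
        (PySem.List.pyRange (i + 1) (PySem.List.len sentences) 1).foldl (fun d2 j =>
          if PySem.List.pyGetD sentences i "" ≠ PySem.List.pyGetD sentences j "" then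
            match altLongestCommon (PySem.List.pyGetD sentences i "")
                                   (PySem.List.pyGetD sentences j "") with
            | none => d2
            | some c =>
              if 10 < PySem.Str.len c then d2.insert c (d2.getD c 0 + 1) else d2
          else d2) d) (PySem.Dict.empty : PySem.Dict String Int) = D
  cases hitems : D.items with
  | nil => simp
  | cons c rest =>
    rw [if_neg (by simp), if_neg (by simp)]
    have hmax : PySem.List.max? (c :: rest) (fun kv : String × Int => kv.2) =
        (c :: rest).foldl (pvMax (fun kv : String × Int => kv.2)) none := by
      unfold PySem.List.max?
      apply PySem.List.foldl_congr_mem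
      intro acc x _
      cases acc <;> rfl
    have hsel := head_sorted_rev (key := fun (p : String × Int) => p.2) (l := c :: rest)
    rw [hmax]
    cases hf : (c :: rest).foldl (pvMax (fun kv : String × Int => kv.2)) none with
    | none =>
      exfalso
      rw [List.foldl_cons,
        show pvMax (fun kv : String × Int => kv.2) none c = some c from rfl] at hf
      obtain ⟨z, hz⟩ : ∃ z, rest.foldl (pvMax (fun kv : String × Int => kv.2)) (some c) = some z := by
        clear hf hsel hitems hmax
        induction rest generalizing c with
        | nil => exact ⟨c, rfl⟩
        | cons x t ih =>
          simp only [List.foldl_cons, pvMax]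
          by_cases h : c.2 < x.2
          · simpa [h] using ih x
          · simpa [h] using ih c
      rw [hz] at hf; cases hf
    | some q =>
      rw [hf] at hsel
      cases hs : PySem.List.sorted (c :: rest) (fun p => p.2) true with
      | nil => rw [hs] at hsel; cases hsel
      | cons a t =>
        rw [hs] at hsel
        have ha : a = q := by simpa using hsel
        subst ha
        simp [PySem.List.pyGetD_zero_cons]
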